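-- pv_equiv track=rewrite | github.com/thealper2/codewars-solutions | 7-kyu/yoga_class.py | yoga
-- ===== SOURCE A (Python) =====
-- def yoga(classroom, poses):
--     total = 0
--
--     for row in classroom:
--         row_sum = sum(row)
--         for pose in poses:
--             for skill in row:
--                 if row_sum + skill >= pose:
--                     total += 1
--
--     return total
-- ===== SOURCE B (Python) =====
-- def yoga(classroom, poses):
--     # Sort poses once; for each (row, skill) count qualifying poses by binary search.
--     ps = sorted(poses)
--     n = len(ps)
--
--     def count_le(t):
--         # bisect_right(ps, t), hand-written since A imports nothing
--         lo, hi = 0, n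
--         while lo < hi:
--             mid = (lo + hi) // 2
--             if t < ps[mid]:
--                 hi = mid
--             else:
--                 lo = mid + 1
--         return lo
--
--     total = 0
--     for row in classroom:
--         rs = sum(row)
--         for skill in row:
--             total += count_le(rs + skill)
--     return total
-- ===== Notes on version B (the rewrite author's own statement) =====
-- stated objective: faster
-- what changed: Instead of testing every (row, pose, skill) triple, B sorts the poses once and, per (row, skill), counts qualifying poses with a binary search (bisect_right), summing the counts.
import Mathlib
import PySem

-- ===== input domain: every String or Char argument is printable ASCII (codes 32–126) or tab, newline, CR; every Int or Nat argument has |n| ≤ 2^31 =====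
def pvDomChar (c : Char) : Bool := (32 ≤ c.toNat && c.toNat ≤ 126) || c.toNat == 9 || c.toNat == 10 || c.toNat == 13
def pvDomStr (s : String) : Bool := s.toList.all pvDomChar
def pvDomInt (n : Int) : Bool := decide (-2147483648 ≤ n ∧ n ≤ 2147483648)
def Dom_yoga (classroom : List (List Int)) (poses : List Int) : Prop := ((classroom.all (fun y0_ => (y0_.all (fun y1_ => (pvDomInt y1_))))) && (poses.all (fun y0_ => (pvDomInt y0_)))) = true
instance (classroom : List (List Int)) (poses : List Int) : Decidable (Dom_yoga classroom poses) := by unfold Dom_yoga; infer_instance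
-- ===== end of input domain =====

-- B replaces A's triple nested scan by sorting poses once and counting qualifying poses
-- per (row, skill) with a binary search (bisect_right); same return value, proved below.

-- ===== PORT A =====
def yoga (classroom : List (List Int)) (poses : List Int) : Int :=
  classroom.foldl (fun total row =>
    let row_sum := row.sum
    poses.foldl (fun tot pose =>
      row.foldl (fun t skill => if row_sum + skill ≥ pose then t + 1 else t) tot) total) 0

-- ===== PORT B =====
-- Source B's hand-written lo/hi loop is exactly the bisect_right algorithm; ported as the
-- prelude primitive PySem.List.bisectRight (same lo/hi binary search).
def yoga_alt (classroom : List (List Int)) (poses : List Int) : Int :=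
  let ps := PySem.List.sorted poses (fun x => x) false
  classroom.foldl (fun total row =>
    let rs := row.sum
    row.foldl (fun t skill => t + ((PySem.List.bisectRight ps (rs + skill) : Nat) : Int)) total) 0

-- ===== PRECONDITION & SPEC =====
def Spec_yoga (classroom : List (List Int)) (poses : List Int) (out : Int) : Prop := out = yoga_alt classroom poses
instance (classroom : List (List Int)) (poses : List Int) (out : Int) : Decidable (Spec_yoga classroom poses out) := by unfold Spec_yoga; infer_instance

-- ===== CLAIM (what is proved, stated in full; the proofs are below) =====
def Claim_equal_yoga : Prop := ∀ (classroom : List (List Int)) (poses : List Int), Dom_yoga classroom poses → Spec_yoga classroom poses (yoga classroom poses)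

-- ===== LEMMAS AND PROOFS =====

-- If r splits xs into a prefix of elements ≤ t and a suffix of elements > t,
-- then r is the count of elements ≤ t.
theorem pv_countP_eq_of_split (xs : List Int) (t : Int) (r : Nat) (hr : r ≤ xs.length)
    (h1 : ∀ (j : Nat) (hj : j < xs.length), j < r → xs[j] ≤ t)
    (h2 : ∀ (j : Nat) (hj : j < xs.length), r ≤ j → t < xs[j]) :
    xs.countP (fun x => decide (x ≤ t)) = r := by
  induction xs generalizing r with
  | nil => simp at hr; simp [hr]
  | cons x xs ih =>
    cases r with
    | zero =>
      rw [List.countP_eq_zero]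
      intro a ha
      obtain ⟨j, hj, rfl⟩ := List.mem_iff_getElem.mp ha
      have := h2 j hj (Nat.zero_le _)
      simpa using this
    | succ r =>
      have hx : x ≤ t := by
        have := h1 0 (by simp) (Nat.succ_pos _)
        simpa using this
      rw [List.countP_cons]
      have hxs : xs.countP (fun x => decide (x ≤ t)) = r := by
        apply ih r (by simp at hr; omega)
        · intro j hj hjr
          have := h1 (j+1) (by simp; omega) (by omega)
          simpa using this
        · intro j hj hjr
          have := h2 (j+1) (by simp; omega) (by omega)
          simpa using this
      simp [hxs, hx]

-- bisect_right on a sorted list counts the elements ≤ t.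
theorem pv_bisect_eq_countP (xs : List Int) (t : Int) (h : xs.Pairwise (· ≤ ·)) :
    PySem.List.bisectRight xs t = xs.countP (fun x => decide (x ≤ t)) := by
  obtain ⟨h0, h1, h2⟩ := PySem.List.bisectRight_spec xs t h
  exact (pv_countP_eq_of_split xs t _ h0 h1 h2).symm

-- A's innermost loop counts the skills meeting the threshold.
theorem pv_foldl_if_count (row : List Int) (rs pose : Int) (a : Int) :
    row.foldl (fun t skill => if rs + skill ≥ pose then t + 1 else t) a
      = a + ((row.countP (fun s => decide (pose ≤ rs + s)) : Nat) : Int) := by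
  induction row generalizing a with
  | nil => simp
  | cons s row ih =>
    rw [List.foldl_cons, ih, List.countP_cons]
    by_cases hs : pose ≤ rs + s <;> simp [hs, ge_iff_le] <;> push_cast <;> ring

-- Double-counting swap: summing per-pose skill counts equals summing per-skill pose counts.
theorem pv_sum_count_swap (poses row : List Int) (rs : Int) :
    (poses.map (fun p => ((row.countP (fun s => decide (p ≤ rs + s)) : Nat) : Int))).sum
      = (row.map (fun s => ((poses.countP (fun p => decide (p ≤ rs + s)) : Nat) : Int))).sum := by
  induction poses with
  | nil => simp
  | cons p ps ih =>
    rw [List.map_cons, List.sum_cons, ih]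
    have hmap : (row.map (fun s => ((List.countP (fun q => decide (q ≤ rs + s)) (p :: ps) : Nat) : Int)))
        = row.map (fun s => (if (fun s => decide (p ≤ rs + s)) s then (1 : Int) else 0)
            + ((List.countP (fun q => decide (q ≤ rs + s)) ps : Nat) : Int)) := by
      apply List.map_congr_left
      intro s _
      rw [List.countP_cons]
      by_cases hs : p ≤ rs + s <;> simp [hs] <;> push_cast <;> ring
    rw [hmap, PySem.List.sum_map_add_int, PySem.List.sum_map_ite_one_zero]

-- ===== VERDICT (by name: the statement is the Claim_ definition above) =====
theorem yoga_spec : Claim_equal_yoga := by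
  intro classroom poses _
  unfold Spec_yoga yoga yoga_alt
  have hpair : (PySem.List.sorted poses (fun x => x) false).Pairwise (· ≤ ·) := by
    simpa using PySem.List.sorted_pairwise poses (fun x => x)
  have hperm : (PySem.List.sorted poses (fun x => x) false).Perm poses :=
    PySem.List.sorted_perm poses (fun x => x) false
  have hstep : ∀ (total : Int) (row : List Int),
      List.foldl (fun tot pose =>
        List.foldl (fun t skill => if row.sum + skill ≥ pose then t + 1 else t) tot row) total poses
      = List.foldl (fun t skill =>
          t + ((PySem.List.bisectRight (PySem.List.sorted poses (fun x => x) false) (row.sum + skill) : Nat) : Int)) total row := by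
    intro total row
    have hA : (fun (tot : Int) (pose : Int) =>
        List.foldl (fun t skill => if row.sum + skill ≥ pose then t + 1 else t) tot row)
        = fun tot pose => tot + ((row.countP (fun s => decide (pose ≤ row.sum + s)) : Nat) : Int) := by
      funext tot pose
      exact pv_foldl_if_count row row.sum pose tot
    rw [hA, PySem.List.foldl_add, PySem.List.foldl_add, pv_sum_count_swap]
    congr 1
    refine congrArg List.sum (List.map_congr_left ?_)
    intro s _
    rw [pv_bisect_eq_countP _ _ hpair, hperm.countP_eq]
  have hfun : (fun (total : Int) (row : List Int) =>
      List.foldl (fun tot pose =>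
        List.foldl (fun t skill => if row.sum + skill ≥ pose then t + 1 else t) tot row) total poses)
    = (fun (total : Int) (row : List Int) =>
      List.foldl (fun t skill =>
        t + ((PySem.List.bisectRight (PySem.List.sorted poses (fun x => x) false) (row.sum + skill) : Nat) : Int)) total row) := by
    funext total row
    exact hstep total row
  show List.foldl (fun (total : Int) (row : List Int) =>
      List.foldl (fun tot pose =>
        List.foldl (fun t skill => if row.sum + skill ≥ pose then t + 1 else t) tot row) total poses) 0 classroom
    = List.foldl (fun (total : Int) (row : List Int) =>
      List.foldl (fun t skill =>
        t + ((PySem.List.bisectRight (PySem.List.sorted poses (fun x => x) false) (row.sum + skill) : Nat) : Int)) total row) 0 classroom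
  rw [hfun]
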